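-- pv_equiv track=rewrite | github.com/tetianakh/bcbio-nextgen-vm | bcbiovm/docker/remap.py | remap_fname
-- ===== SOURCE A (Python) =====
-- def remap_fname(fname, remap_dict):
--     """Remap a filename given potential remapping mount points.
--     """
--     matches = []
--     for k, v in remap_dict.items():
--         if fname.startswith(k):
--             matches.append((k, v))
--     matches.sort(key=lambda x: len(x[0]), reverse=True)
--     remap_orig, remap_new = matches[0]
--     return fname.replace(remap_orig, remap_new)
-- ===== SOURCE B (Python) =====
-- def remap_fname(fname, remap_dict):
--     """Remap a filename given potential remapping mount points.
--
--     Single pass: keep the first (k, v) with the longest prefix k of fname.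
--     """
--     best = None
--     for k, v in remap_dict.items():
--         if fname.startswith(k) and (best is None or len(k) > len(best[0])):
--             best = (k, v)
--     return fname.replace(best[0], best[1])
-- ===== Notes on version B (the rewrite author's own statement) =====
-- stated objective: simpler
-- what changed: Replaces building a list of all matching prefixes and stably sorting it by key length descending with a single pass that keeps the first longest matching (k, v); no match still raises (A: IndexError, B: TypeError), excluded by Pre_.
import Mathlib
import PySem

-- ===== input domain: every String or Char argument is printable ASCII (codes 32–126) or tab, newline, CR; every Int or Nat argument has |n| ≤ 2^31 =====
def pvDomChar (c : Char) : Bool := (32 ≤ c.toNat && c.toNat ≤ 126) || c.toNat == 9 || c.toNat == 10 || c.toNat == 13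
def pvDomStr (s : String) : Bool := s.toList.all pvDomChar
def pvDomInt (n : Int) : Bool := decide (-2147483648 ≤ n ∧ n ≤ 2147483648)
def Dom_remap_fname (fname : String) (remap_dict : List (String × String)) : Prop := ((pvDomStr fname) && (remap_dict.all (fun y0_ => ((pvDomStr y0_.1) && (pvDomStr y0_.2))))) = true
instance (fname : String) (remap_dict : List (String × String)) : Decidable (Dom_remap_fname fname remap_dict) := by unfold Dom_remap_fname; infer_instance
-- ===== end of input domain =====

-- B replaces collect-all-matches + stable sort by key length (descending) with a
-- single pass keeping the first longest matching (k, v); same return value on Pre_.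


-- ===== PORT A =====
def remap_fname (fname : String) (remap_dict : List (String × String)) : String :=
  -- matches = the (k, v) with fname.startswith(k); then matches.sort(key=len of k, reverse=True)
  match PySem.List.pyGet?
      (PySem.List.sorted
        ((PySem.Dict.ofList remap_dict).items.foldl
          (fun acc p => if PySem.Str.startswith fname p.1 then acc ++ [p] else acc) [])
        (fun p => PySem.Str.len p.1) true)
      0 with
  | some p => PySem.Str.replace fname p.1 p.2
  | none => ""   -- matches[0] raises IndexError in Python; excluded by Pre_

-- ===== PORT B =====
-- loop body of B: take p as the new best if it matches and is strictly longer
def pvBestStep (fname : String) (b : Option (String × String)) (p : String × String) :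
    Option (String × String) :=
  if PySem.Str.startswith fname p.1 &&
     (match b with
      | none => true
      | some m => decide (PySem.Str.len m.1 < PySem.Str.len p.1))
  then some p else b

def remap_fname_alt (fname : String) (remap_dict : List (String × String)) : String :=
  -- best = first (k, v) with fname.startswith(k) and len(k) maximal, in one pass
  match (PySem.Dict.ofList remap_dict).items.foldl (pvBestStep fname) none with
  | some p => PySem.Str.replace fname p.1 p.2
  | none => ""   -- best is None: Python B raises here; excluded by Pre_

-- ===== PRECONDITION & SPEC =====
-- Pre_ excludes exactly the inputs with no key of the dict a prefix of fname: there the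
-- Python A raises IndexError (matches[0] on an empty list), so A returns nowhere outside Pre_.
def Pre_remap_fname (fname : String) (remap_dict : List (String × String)) : Prop :=
  ∃ p ∈ (PySem.Dict.ofList remap_dict).items, PySem.Str.startswith fname p.1 = true
instance (fname : String) (remap_dict : List (String × String)) : Decidable (Pre_remap_fname fname remap_dict) := by unfold Pre_remap_fname; infer_instance
def pvWitness_remap_fname : String × (List (String × String)) := ("abc", [("a", "x"), ("ab", "y")])
def Spec_remap_fname (fname : String) (remap_dict : List (String × String)) (out : String) : Prop := out = remap_fname_alt fname remap_dict
instance (fname : String) (remap_dict : List (String × String)) (out : String) : Decidable (Spec_remap_fname fname remap_dict out) := by unfold Spec_remap_fname; infer_instance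

-- ===== CLAIM (what is proved, stated in full; the proofs are below) =====
def Claim_equal_remap_fname : Prop := ∀ (fname : String) (remap_dict : List (String × String)), Dom_remap_fname fname remap_dict → Pre_remap_fname fname remap_dict → Spec_remap_fname fname remap_dict (remap_fname fname remap_dict)

-- ===== LEMMAS AND PROOFS =====

-- proof-side name for the running first-maximum loop body
def pvMaxStep {α κ : Type} [LT κ] [DecidableLT κ] (key : α → κ) (b : Option α) (x : α) : Option α :=
  match b with
  | none => some x
  | some m => if key m < key x then some x else some m

-- head of an insertBy step: the new head is the better of x and the old head
lemma head?_insertBy {α : Type} (before : α → α → Bool) (x : α) (ys : List α) :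
    (PySem.List.insertBy before x ys).head? =
      some (match ys with | [] => x | y :: _ => if before x y then x else y) := by
  cases ys with
  | nil => rfl
  | cons y t =>
    simp only [PySem.List.insertBy]
    split <;> rfl

-- the head of the descending stable sort is the running first-maximum (= PySem.List.max?)
lemma head?_foldl_insertBy {α κ : Type} [LinearOrder κ] (key : α → κ) :
    ∀ (l acc : List α),
      (l.foldl (fun acc x => PySem.List.insertBy (fun a b => decide (key b < key a)) x acc) acc).head? =
        l.foldl (pvMaxStep key) acc.head? := by
  intro l
  induction l with
  | nil => intro acc; rfl
  | cons x t ih =>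
    intro acc
    simp only [List.foldl_cons]
    rw [ih]
    congr 1
    rw [head?_insertBy]
    cases acc with
    | nil => rfl
    | cons y ys =>
      by_cases h : key y < key x
      · simp [pvMaxStep, h]
      · simp [pvMaxStep, h]

lemma head?_sorted_rev_eq_max? {α κ : Type} [LinearOrder κ] (l : List α) (key : α → κ) :
    (PySem.List.sorted l key true).head? = l.foldl (pvMaxStep key) none := by
  simp only [PySem.List.sorted, if_pos]
  exact head?_foldl_insertBy key l []

-- B's combined filter-and-max pass equals the first-maximum of the filtered list
lemma foldl_best_eq_max?_filter (fname : String) :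
    ∀ (l : List (String × String)) (b0 : Option (String × String)),
      l.foldl (pvBestStep fname) b0 =
        (l.filter (fun p => PySem.Str.startswith fname p.1)).foldl
          (pvMaxStep (fun p => PySem.Str.len p.1)) b0 := by
  intro l
  induction l with
  | nil => intro b0; rfl
  | cons x t ih =>
    intro b0
    simp only [List.foldl_cons]
    rw [ih]
    by_cases hq : PySem.Str.startswith fname x.1 = true
    · have hc : PySem.Chars.startswith fname.toList x.1.toList = true := by
        simpa [PySem.Str.startswith] using hq
      rw [show List.filter (fun p => PySem.Str.startswith fname p.1) (x :: t)
            = x :: List.filter (fun p => PySem.Str.startswith fname p.1) t from by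
          simp [hc]]
      rw [List.foldl_cons]
      congr 1
      cases b0 with
      | none => simp [pvBestStep, pvMaxStep, hc]
      | some m => simp [pvBestStep, pvMaxStep, hc]
    · simp only [Bool.not_eq_true] at hq
      have hc : PySem.Chars.startswith fname.toList x.1.toList = false := by
        simpa [PySem.Str.startswith] using hq
      rw [show List.filter (fun p => PySem.Str.startswith fname p.1) (x :: t)
            = List.filter (fun p => PySem.Str.startswith fname p.1) t from by
          simp [hc]]
      congr 1
      simp [pvBestStep, hc]

-- ===== VERDICT (by name: the statement is the Claim_ definition above) =====
theorem remap_fname_spec : Claim_equal_remap_fname := by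
  intro fname remap_dict _ _
  unfold Spec_remap_fname remap_fname remap_fname_alt
  rw [foldl_best_eq_max?_filter]
  rw [PySem.List.foldl_append_if (f := fun (p : String × String) => p)]
  simp only [List.nil_append, List.map_id']
  rw [PySem.List.pyGet?_zero]
  rw [show ∀ (l : List (String × String)), l[0]? = l.head? from fun l => by cases l <;> rfl]
  rw [head?_sorted_rev_eq_max?]
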